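-- pv_equiv track=rewrite | github.com/dev-khg/baekjooin-algo-java | 프로그래머스/2/42584. 주식가격/주식가격.py | solution
-- ===== SOURCE A (Python) =====
-- def solution(prices):
--     stack = []
--     answer = [0] * len(prices)
--     for idx in range(len(prices)):
--         while stack and prices[stack[-1]] > prices[idx]:
--             answer[stack[-1]] = idx - stack[-1]
--             stack.pop()
--         stack.append(idx)
--
--     while stack:
--         idx = stack.pop()
--         answer[idx] = len(prices) - idx - 1
--
--     return answer
-- ===== SOURCE B (Python) =====
-- def solution(prices):
--     answer = []
--     for i in range(len(prices)):
--         p = prices[i]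
--         cnt = 0
--         for x in prices[i + 1:]:
--             cnt += 1
--             if x < p:
--                 break
--         answer.append(cnt)
--     return answer
-- ===== Notes on version B (the rewrite author's own statement) =====
-- stated objective: alternative
-- what changed: Replaces the single-pass monotonic index stack with per-index forward scans that count steps until a strictly smaller price appears.
import Mathlib
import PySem

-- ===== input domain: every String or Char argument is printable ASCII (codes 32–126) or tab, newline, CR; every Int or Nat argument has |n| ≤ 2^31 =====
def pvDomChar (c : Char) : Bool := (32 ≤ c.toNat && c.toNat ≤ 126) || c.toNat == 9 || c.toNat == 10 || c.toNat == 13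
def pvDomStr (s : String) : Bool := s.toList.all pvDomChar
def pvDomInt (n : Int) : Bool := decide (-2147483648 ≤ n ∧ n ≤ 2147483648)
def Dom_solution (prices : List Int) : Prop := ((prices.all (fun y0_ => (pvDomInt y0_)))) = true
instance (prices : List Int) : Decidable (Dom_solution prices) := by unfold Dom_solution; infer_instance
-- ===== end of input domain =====

-- B replaces A's monotonic index stack with per-index forward scans (alternative decomposition, same results).

-- ===== PORT A =====
-- inner 'while stack and prices[stack[-1]] > prices[idx]' loop; the stack is kept top-first
def pvPop (prices : List Int) (idx : Int) : List Int → List Int → List Int × List Int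
  | [], ans => ([], ans)
  | t :: r, ans =>
    if PySem.List.pyGetD prices t 0 > PySem.List.pyGetD prices idx 0 then
      pvPop prices idx r (PySem.List.pySetD ans t (idx - t))
    else (t :: r, ans)

def solution (prices : List Int) : List Int :=
  let n := prices.length
  let st := (PySem.List.pyRange 0 n 1).foldl
    (fun (s : List Int × List Int) idx =>
      let r := pvPop prices idx s.1 s.2
      (idx :: r.1, r.2))
    ([], List.replicate n 0)
  st.1.foldl (fun ans idx => PySem.List.pySetD ans idx ((n : Int) - idx - 1)) st.2

-- ===== PORT B =====
-- inner 'for x in prices[i+1:]: cnt += 1; if x < p: break' loop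
def pvCount (p : Int) : List Int → Int
  | [] => 0
  | x :: xs => if x < p then 1 else 1 + pvCount p xs

def solution_alt (prices : List Int) : List Int :=
  (PySem.List.pyRange 0 prices.length 1).foldl
    (fun ans i =>
      ans ++ [pvCount (PySem.List.pyGetD prices i 0) (PySem.List.slice prices (some (i + 1)) none)])
    []

-- ===== PRECONDITION & SPEC =====
def Spec_solution (prices : List Int) (out : List Int) : Prop := out = solution_alt prices
instance (prices : List Int) (out : List Int) : Decidable (Spec_solution prices out) := by unfold Spec_solution; infer_instance

-- ===== CLAIM (what is proved, stated in full; the proofs are below) =====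
def Claim_equal_solution : Prop := ∀ (prices : List Int), Dom_solution prices → Spec_solution prices (solution prices)

-- ===== LEMMAS AND PROOFS =====

-- the value B computes for index m
def pvB (prices : List Int) (m : Nat) : Int :=
  pvCount (PySem.List.pyGetD prices (m : Int) 0) (prices.drop (m + 1))

-- invariant on A's stack after processing indices 0..k-1
def pvGoodStack (prices : List Int) (k : Nat) (s : List Int) : Prop :=
  (∀ i ∈ s, 0 ≤ i ∧ i < (k : Int)) ∧
  s.Pairwise (fun a b => b < a) ∧
  s.Pairwise (fun a b => PySem.List.pyGetD prices b 0 ≤ PySem.List.pyGetD prices a 0) ∧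
  (∀ i ∈ s, ∀ j : Int, i < j → j < (k : Int) →
     PySem.List.pyGetD prices i 0 ≤ PySem.List.pyGetD prices j 0)

-- invariant on A's answer array after processing indices 0..k-1
def pvGoodAns (prices : List Int) (k : Nat) (s : List Int) (ans : List Int) : Prop :=
  ans.length = prices.length ∧
  ∀ m : Nat, m < k → ((m : Int) ∈ s ∨ ans.getD m 0 = pvB prices m)

theorem pvGet (prices : List Int) (m : Nat) (h : m < prices.length) :
    PySem.List.pyGetD prices (m : Int) 0 = prices[m] := by
  rw [PySem.List.pyGetD_natCast, List.getD_eq_getElem _ _ h]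

theorem pvCount_break (p : Int) (l : List Int) (k : Nat) (hk : k < l.length)
    (hget : l[k] < p) (hbefore : ∀ j : Nat, (hj : j < k) → p ≤ l[j]'(by omega)) :
    pvCount p l = (k : Int) + 1 := by
  induction l generalizing k with
  | nil => simp at hk
  | cons x xs ih =>
    cases k with
    | zero =>
      have hx : x < p := by simpa using hget
      simp [pvCount, hx]
    | succ k =>
      have hx : ¬ x < p := by
        have := hbefore 0 (by omega)
        simpa using not_lt.mpr this
      have := ih k (by simpa using hk) (by simpa using hget)
        (fun j hj => by simpa using hbefore (j+1) (by omega))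
      simp [pvCount, hx, this]
      ring

theorem pvCount_all (p : Int) (l : List Int) (h : ∀ x ∈ l, p ≤ x) :
    pvCount p l = (l.length : Int) := by
  induction l with
  | nil => simp [pvCount]
  | cons x xs ih =>
    have hx : ¬ x < p := not_lt.mpr (h x (by simp))
    simp [pvCount, hx, ih (fun y hy => h y (by simp [hy]))]
    ring

-- B's value at m when k is the first later index with a strictly smaller price
theorem pvB_break (prices : List Int) (m k : Nat) (hmk : m < k) (hk : k < prices.length)
    (hmid : ∀ j : Nat, m < j → (hj : j < k) →
      prices[m]'(by omega) ≤ prices[j]'(by omega))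
    (hdrop : prices[k]'hk < prices[m]'(by omega)) :
    pvB prices m = (k : Int) - m := by
  unfold pvB
  rw [pvGet prices m (by omega)]
  have hlen : (prices.drop (m+1)).length = prices.length - (m+1) := by simp
  have hkk : k - m - 1 < (prices.drop (m+1)).length := by rw [hlen]; omega
  have hget : (prices.drop (m+1))[k - m - 1]'hkk < prices[m]'(by omega) := by
    rw [List.getElem_drop]
    have : m + 1 + (k - m - 1) = k := by omega
    simp only [this]; exact hdrop
  have hbef : ∀ j : Nat, (hj : j < k - m - 1) →
      prices[m]'(by omega) ≤ (prices.drop (m+1))[j]'(by omega) := by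
    intro j hj
    rw [List.getElem_drop]
    exact hmid (m + 1 + j) (by omega) (by omega)
  rw [pvCount_break _ _ _ hkk hget hbef]
  omega

-- B's value at m when no later index has a strictly smaller price
theorem pvB_all (prices : List Int) (m : Nat) (hm : m < prices.length)
    (hall : ∀ j : Nat, m < j → (hj : j < prices.length) → prices[m] ≤ prices[j]) :
    pvB prices m = (prices.length : Int) - m - 1 := by
  unfold pvB
  rw [pvGet prices m hm]
  rw [pvCount_all]
  · simp; omega
  · intro x hx
    obtain ⟨j, hj, rfl⟩ := List.mem_iff_getElem.mp hx
    rw [List.getElem_drop]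
    exact hall (m + 1 + j) (by omega) (by simp at hj; omega)

theorem solution_alt_eq_map (prices : List Int) :
    solution_alt prices = (List.range prices.length).map (pvB prices) := by
  unfold solution_alt
  rw [PySem.List.pyRange_zero_nat, List.foldl_map, PySem.List.foldl_append_singleton_eq_map,
    List.nil_append]
  refine List.map_congr_left ?_
  intro m hm
  unfold pvB
  congr 1
  have : ((m : Int) + 1) = ((m + 1 : Nat) : Int) := by push_cast; ring
  rw [this, PySem.List.slice_from_natCast]

theorem pvPop_inv (prices : List Int) (k : Nat) (hk : k < prices.length) :
    ∀ s ans, pvGoodStack prices k s → pvGoodAns prices k s ans →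
      pvGoodStack prices k (pvPop prices (k : Int) s ans).1 ∧
      pvGoodAns prices k (pvPop prices (k : Int) s ans).1 (pvPop prices (k : Int) s ans).2 ∧
      (∀ i ∈ (pvPop prices (k : Int) s ans).1, i ∈ s) ∧
      (∀ i ∈ (pvPop prices (k : Int) s ans).1,
        PySem.List.pyGetD prices i 0 ≤ PySem.List.pyGetD prices (k : Int) 0) := by
  intro s
  induction s with
  | nil =>
    intro ans hS hA
    simp only [pvPop]
    exact ⟨hS, hA, by simp, by simp⟩
  | cons t r ih =>
    intro ans hS hA
    obtain ⟨hb, hdec, hprice, hnd⟩ := hS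
    by_cases hgt : PySem.List.pyGetD prices t 0 > PySem.List.pyGetD prices (k : Int) 0
    · -- pop t
      have ht0 : 0 ≤ t := (hb t (by simp)).1
      have htk : t < (k : Int) := (hb t (by simp)).2
      set m : Nat := t.toNat with hmdef
      have htm : t = (m : Int) := (Int.toNat_of_nonneg ht0).symm
      have hmk : m < k := by omega
      have hBt : pvB prices m = (k : Int) - t := by
        rw [pvB_break prices m k hmk hk]
        · omega
        · intro j hj1 hj2
          have := hnd t (by simp) ((j : Int)) (by omega) (by exact_mod_cast hj2)
          rwa [htm, pvGet prices m (by omega), pvGet prices j (by omega)] at this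
        · have h1 := hgt
          rwa [htm, pvGet prices m (by omega), pvGet prices k hk] at h1
      have hset : PySem.List.pySetD ans t ((k : Int) - t) = ans.set m ((k : Int) - t) :=
        PySem.List.pySetD_of_nonneg ans _ ht0
      have hlen' : (ans.set m ((k : Int) - t)).length = prices.length := by
        simpa using hA.1
      have hA' : pvGoodAns prices k r (PySem.List.pySetD ans t ((k : Int) - t)) := by
        rw [hset]
        refine ⟨hlen', ?_⟩
        intro m' hm'
        by_cases hm'm : m' = m
        · subst hm'm
          right
          rw [List.getD_eq_getElem _ _ (by rw [hlen']; omega), List.getElem_set_self, hBt]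
        · rcases hA.2 m' hm' with hmem | hsettle
          · rcases List.mem_cons.mp hmem with heq | hmem'
            · exfalso; apply hm'm; omega
            · exact Or.inl hmem'
          · right
            rw [← hsettle]
            have hlt : m' < ans.length := by rw [hA.1]; omega
            rw [List.getD_eq_getElem _ _ (by rwa [List.length_set]),
              List.getD_eq_getElem _ _ hlt, List.getElem_set_ne (by omega)]
      have hS' : pvGoodStack prices k r :=
        ⟨fun i hi => hb i (by simp [hi]),
         (List.pairwise_cons.mp hdec).2,
         (List.pairwise_cons.mp hprice).2,
         fun i hi => hnd i (by simp [hi])⟩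
      have heq : pvPop prices (k : Int) (t :: r) ans
          = pvPop prices (k : Int) r (PySem.List.pySetD ans t ((k : Int) - t)) := by
        simp only [pvPop]
        rw [if_pos hgt]
      obtain ⟨c1, c2, c3, c4⟩ := ih _ hS' hA'
      rw [heq]
      exact ⟨c1, c2, fun i hi => by simp [c3 i hi], c4⟩
    · -- stop
      have heq : pvPop prices (k : Int) (t :: r) ans = (t :: r, ans) := by
        simp only [pvPop]
        rw [if_neg hgt]
      rw [heq]
      refine ⟨⟨hb, hdec, hprice, hnd⟩, hA, fun i hi => hi, ?_⟩
      intro i hi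
      rcases List.mem_cons.mp hi with rfl | hir
      · exact not_lt.mp hgt
      · exact le_trans ((List.pairwise_cons.mp hprice).1 i hir) (not_lt.mp hgt)

theorem pvLoop_inv (prices : List Int) :
    ∀ k : Nat, k ≤ prices.length →
      pvGoodStack prices k ((PySem.List.pyRange 0 k 1).foldl
        (fun (s : List Int × List Int) idx =>
          let r := pvPop prices idx s.1 s.2
          (idx :: r.1, r.2)) ([], List.replicate prices.length 0)).1 ∧
      pvGoodAns prices k ((PySem.List.pyRange 0 k 1).foldl
        (fun (s : List Int × List Int) idx =>
          let r := pvPop prices idx s.1 s.2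
          (idx :: r.1, r.2)) ([], List.replicate prices.length 0)).1
        ((PySem.List.pyRange 0 k 1).foldl
        (fun (s : List Int × List Int) idx =>
          let r := pvPop prices idx s.1 s.2
          (idx :: r.1, r.2)) ([], List.replicate prices.length 0)).2 := by
  intro k
  induction k with
  | zero =>
    intro _
    have h0 : PySem.List.pyRange 0 ((0 : Nat) : Int) 1 = [] :=
      PySem.List.pyRange_one_eq_nil (by simp)
    rw [h0]
    constructor
    · exact ⟨by simp, by simp, by simp, by simp⟩
    · exact ⟨by simp, by omega⟩
  | succ k ih =>
    intro hk1
    have hk : k < prices.length := by omega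
    have hsplit : PySem.List.pyRange 0 ((k + 1 : Nat) : Int) 1
        = PySem.List.pyRange 0 (k : Nat) 1 ++ [(k : Int)] := by
      have : ((k + 1 : Nat) : Int) = (k : Int) + 1 := by push_cast; ring
      rw [this, PySem.List.pyRange_one_succ_right (by positivity)]
    rw [hsplit, List.foldl_append]
    obtain ⟨hS, hA⟩ := ih (by omega)
    set st := (PySem.List.pyRange 0 (k : Nat) 1).foldl
      (fun (s : List Int × List Int) idx =>
        let r := pvPop prices idx s.1 s.2
        (idx :: r.1, r.2)) ([], List.replicate prices.length 0) with hst
    obtain ⟨c1, c2, c3, c4⟩ := pvPop_inv prices k hk st.1 st.2 hS hA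
    simp only [List.foldl_cons, List.foldl_nil]
    constructor
    · refine ⟨?_, ?_, ?_, ?_⟩
      · intro i hi
        rcases List.mem_cons.mp hi with rfl | hi'
        · constructor <;> [positivity; (push_cast; omega)]
        · obtain ⟨h1, h2⟩ := c1.1 i hi'
          exact ⟨h1, by push_cast; omega⟩
      · exact List.pairwise_cons.mpr ⟨fun i hi => (c1.1 i hi).2, c1.2.1⟩
      · exact List.pairwise_cons.mpr ⟨fun i hi => c4 i hi, c1.2.2.1⟩
      · intro i hi j hij hjk1
        rcases List.mem_cons.mp hi with rfl | hi'
        · exfalso; push_cast at hjk1; omega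
        · have hjk : j < (k : Int) ∨ j = (k : Int) := by push_cast at hjk1; omega
          rcases hjk with hjk | rfl
          · exact c1.2.2.2 i hi' j hij hjk
          · exact c4 i hi'
    · refine ⟨c2.1, ?_⟩
      intro m hm
      by_cases hmk : m = k
      · subst hmk; exact Or.inl (by simp)
      · rcases c2.2 m (by omega) with hmem | hset
        · exact Or.inl (by simp [hmem])
        · exact Or.inr hset

theorem pvFinal (prices : List Int) :
    ∀ s ans, pvGoodStack prices prices.length s → pvGoodAns prices prices.length s ans →
      (s.foldl (fun a i => PySem.List.pySetD a i ((prices.length : Int) - i - 1)) ans).length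
        = prices.length ∧
      ∀ m : Nat, m < prices.length →
        (s.foldl (fun a i => PySem.List.pySetD a i ((prices.length : Int) - i - 1)) ans).getD m 0
          = pvB prices m := by
  intro s
  induction s with
  | nil =>
    intro ans hS hA
    refine ⟨hA.1, ?_⟩
    intro m hm
    rcases hA.2 m hm with hmem | hset
    · simp at hmem
    · simpa using hset
  | cons t r ih =>
    intro ans hS hA
    obtain ⟨hb, hdec, hprice, hnd⟩ := hS
    have ht0 : 0 ≤ t := (hb t (by simp)).1
    have htn : t < (prices.length : Int) := (hb t (by simp)).2
    set m : Nat := t.toNat with hmdef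
    have htm : t = (m : Int) := (Int.toNat_of_nonneg ht0).symm
    have hmn : m < prices.length := by omega
    have hBt : pvB prices m = (prices.length : Int) - t - 1 := by
      rw [pvB_all prices m hmn]
      · omega
      · intro j hj1 hj2
        have := hnd t (by simp) ((j : Int)) (by omega) (by exact_mod_cast hj2)
        rwa [htm, pvGet prices m hmn, pvGet prices j hj2] at this
    have hset : PySem.List.pySetD ans t ((prices.length : Int) - t - 1)
        = ans.set m ((prices.length : Int) - t - 1) :=
      PySem.List.pySetD_of_nonneg ans _ ht0
    have hlen' : (ans.set m ((prices.length : Int) - t - 1)).length = prices.length := by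
      simpa using hA.1
    have hA' : pvGoodAns prices prices.length r
        (PySem.List.pySetD ans t ((prices.length : Int) - t - 1)) := by
      rw [hset]
      refine ⟨hlen', ?_⟩
      intro m' hm'
      by_cases hm'm : m' = m
      · subst hm'm
        right
        rw [List.getD_eq_getElem _ _ (by rw [hlen']; omega), List.getElem_set_self, hBt]
      · rcases hA.2 m' hm' with hmem | hsettle
        · rcases List.mem_cons.mp hmem with heq | hmem'
          · exfalso; apply hm'm; omega
          · exact Or.inl hmem'
        · right
          rw [← hsettle]
          have hlt : m' < ans.length := by rw [hA.1]; omega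
          rw [List.getD_eq_getElem _ _ (by rwa [List.length_set]),
            List.getD_eq_getElem _ _ hlt, List.getElem_set_ne (by omega)]
    have hS' : pvGoodStack prices prices.length r :=
      ⟨fun i hi => hb i (by simp [hi]),
       (List.pairwise_cons.mp hdec).2,
       (List.pairwise_cons.mp hprice).2,
       fun i hi => hnd i (by simp [hi])⟩
    simpa using ih _ hS' hA'

-- ===== VERDICT (by name: the statement is the Claim_ definition above) =====
theorem solution_spec : Claim_equal_solution := by
  intro prices _
  unfold Spec_solution
  rw [solution_alt_eq_map]
  unfold solution
  have h := pvLoop_inv prices prices.length le_rfl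
  have hf := pvFinal prices _ _ h.1 h.2
  refine List.ext_getElem (by simp [hf.1]) ?_
  intro m h1 h2
  have hm : m < prices.length := by simpa using h2
  have := hf.2 m hm
  simp only [List.getElem_map, List.getElem_range]
  rw [← this, List.getD_eq_getElem]
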